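-- pv_equiv track=rewrite | github.com/tomga/genodebuildtool | gscons/genode_build_helper.py | split_non_unique_args
-- ===== SOURCE A (Python) =====
-- def split_non_unique_args(args):
--     nonunique, unique = [], []
--     last_was_include = False
--     for arg in args:
--         if last_was_include or arg == '-include':
--             nonunique.append(arg)
--             last_was_include = not last_was_include
--         else:
--             unique.append(arg)
--     return nonunique, unique
-- ===== SOURCE B (Python) =====
-- def split_non_unique_args(args):
--     nonunique, unique = [], []
--     i = 0
--     n = len(args)
--     while i < n:
--         if args[i] == '-include':
--             nonunique.append(args[i])
--             if i + 1 < n: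
--                 nonunique.append(args[i + 1])
--             i += 2
--         else:
--             unique.append(args[i])
--             i += 1
--     return nonunique, unique
-- ===== Notes on version B (the rewrite author's own statement) =====
-- stated objective: alternative
-- what changed: Replaced the flag-toggled per-item for loop with an index-driven while loop that consumes a '-include' token together with its following argument as one two-element chunk.
import Mathlib
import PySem

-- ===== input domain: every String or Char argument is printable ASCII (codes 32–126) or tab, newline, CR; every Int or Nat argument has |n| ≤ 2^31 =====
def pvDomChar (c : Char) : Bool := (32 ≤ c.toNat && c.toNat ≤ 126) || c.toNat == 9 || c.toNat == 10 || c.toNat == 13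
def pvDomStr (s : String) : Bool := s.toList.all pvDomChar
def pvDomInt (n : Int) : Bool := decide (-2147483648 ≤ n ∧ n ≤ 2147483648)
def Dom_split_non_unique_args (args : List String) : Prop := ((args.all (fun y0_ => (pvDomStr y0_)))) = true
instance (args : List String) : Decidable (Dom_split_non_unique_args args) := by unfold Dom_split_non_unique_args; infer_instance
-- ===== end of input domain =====

-- B replaces A's flag-toggled single-item for loop with an index-driven chunk loop ('-include' + follower consumed together); alternative decomposition, same cost.


-- ===== PORT A =====
-- A-side helper: one iteration of A's for loop over state (nonunique, unique, last_was_include)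
def pvStepA (st : List String × List String × Bool) (arg : String) : List String × List String × Bool :=
  if st.2.2 || arg == "-include" then (st.1 ++ [arg], st.2.1, !st.2.2)
  else (st.1, st.2.1 ++ [arg], st.2.2)

def split_non_unique_args (args : List String) : List String × List String :=
  let s := args.foldl pvStepA ([], [], false)
  (s.1, s.2.1)

-- ===== PORT B =====
-- B-side helper: the while loop; the index is represented by the remaining suffix of args,
-- advancing by two positions on '-include' (taking the follower when present) and by one otherwise.
def pvLoopB (rest : List String) (nonunique unique : List String) : List String × List String :=
  match rest with
  | [] => (nonunique, unique)
  | a :: rest' =>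
    if a == "-include" then
      match rest' with
      | [] => (nonunique ++ [a], unique)
      | b :: rest'' => pvLoopB rest'' (nonunique ++ [a, b]) unique
    else pvLoopB rest' nonunique (unique ++ [a])

def split_non_unique_args_alt (args : List String) : List String × List String :=
  pvLoopB args [] []

-- ===== PRECONDITION & SPEC =====
def Spec_split_non_unique_args (args : List String) (out : List String × List String) : Prop := out = split_non_unique_args_alt args
instance (args : List String) (out : List String × List String) : Decidable (Spec_split_non_unique_args args out) := by unfold Spec_split_non_unique_args; infer_instance

-- ===== CLAIM (what is proved, stated in full; the proofs are below) =====
def Claim_equal_split_non_unique_args : Prop := ∀ (args : List String), Dom_split_non_unique_args args → Spec_split_non_unique_args args (split_non_unique_args args)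

-- ===== LEMMAS AND PROOFS =====
-- A's fold from a flag-false state over any suffix agrees with B's loop with the same accumulators.
theorem pvLoop_eq (l : List String) (n u : List String) :
    ((l.foldl pvStepA (n, u, false)).1, (l.foldl pvStepA (n, u, false)).2.1) = pvLoopB l n u := by
  match l with
  | [] => rfl
  | a :: rest =>
    by_cases h : a = "-include"
    · match rest with
      | [] => simp [pvStepA, pvLoopB, h]
      | b :: rest'' =>
        have ih := pvLoop_eq rest'' (n ++ [a, b]) u
        simpa [pvStepA, pvLoopB, h, List.append_assoc] using ih
    · have hb : (a == "-include") = false := by simp [h]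
      have hr : pvLoopB (a :: rest) n u = pvLoopB rest n (u ++ [a]) := by
        rw [pvLoopB.eq_def]; simp [hb]
      rw [hr]
      simpa [pvStepA, hb] using pvLoop_eq rest n (u ++ [a])
termination_by l.length

-- ===== VERDICT (by name: the statement is the Claim_ definition above) =====
theorem split_non_unique_args_spec : Claim_equal_split_non_unique_args := by
  intro args _
  unfold Spec_split_non_unique_args split_non_unique_args split_non_unique_args_alt
  simpa using pvLoop_eq args [] []
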